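-- pv_equiv track=rewrite | github.com/IsLydia/COGS-18-Final-Project-with-Encryption-and-Decryption | String2number.py | remove_punctuation
-- ===== SOURCE A (Python) =====
-- def remove_punctuation(s):
--     punct = [".",",","?","!","'",'"',":",";","-","(",")","[","]"," "]
--     out = ""
--     for i in s:
--         if i.isalpha():
--             out += i.upper()
--         elif i in punct:
--             continue
--         else:
--             return 'Invalid input'
--     return out
-- ===== SOURCE B (Python) =====
-- def remove_punctuation(s):
--     punct = set(".,?!'\":;-()[] ")
--     if all(c.isalpha() or c in punct for c in s):
--         return ''.join(c.upper() for c in s if c.isalpha())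
--     return 'Invalid input'
-- ===== Notes on version B (the rewrite author's own statement) =====
-- stated objective: simpler
-- what changed: Replaces A's interleaved abort-or-accumulate loop by a whole-string validity check (all) followed by a filter-map join; the sentinel makes the partial accumulator irrelevant.
import Mathlib
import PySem

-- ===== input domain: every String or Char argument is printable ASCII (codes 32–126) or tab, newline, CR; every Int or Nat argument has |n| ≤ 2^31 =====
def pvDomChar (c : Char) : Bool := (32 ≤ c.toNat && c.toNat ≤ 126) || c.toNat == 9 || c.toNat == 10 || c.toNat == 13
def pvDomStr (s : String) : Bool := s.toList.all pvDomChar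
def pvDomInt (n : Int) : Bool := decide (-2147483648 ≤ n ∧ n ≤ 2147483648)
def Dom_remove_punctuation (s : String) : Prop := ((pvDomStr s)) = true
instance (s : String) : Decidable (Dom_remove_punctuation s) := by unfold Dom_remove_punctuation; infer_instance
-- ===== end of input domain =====

-- B replaces A's interleaved abort-or-accumulate loop by a full validity check then a filter-map join (simpler decomposition).


-- ===== PORT A =====
def pvPunct : List Char := ['.', ',', '?', '!', '\'', '"', ':', ';', '-', '(', ')', '[', ']', ' ']

-- A's loop: out += i.upper() on alpha, skip punctuation, early-return the sentinel otherwise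
def pvGoA : List Char → List Char → String
  | [], out => String.mk out
  | c :: rest, out =>
    if PySem.Chars.isalpha c then pvGoA rest (out ++ [PySem.Chars.upperChar c])
    else if c ∈ pvPunct then pvGoA rest out
    else "Invalid input"

def remove_punctuation (s : String) : String := pvGoA s.toList []

-- ===== PORT B =====
-- set(".,?!'\":;-()[] ") — the string literal written as its characters
def pvPunctB : PySem.Set Char :=
  PySem.Set.ofList ['.', ',', '?', '!', '\'', '"', ':', ';', '-', '(', ')', '[', ']', ' ']

def remove_punctuation_alt (s : String) : String :=
  if s.toList.all (fun c => PySem.Chars.isalpha c || decide (c ∈ pvPunctB)) then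
    String.mk ((s.toList.filter (fun c => PySem.Chars.isalpha c)).map PySem.Chars.upperChar)
  else "Invalid input"

-- ===== PRECONDITION & SPEC =====
def Spec_remove_punctuation (s : String) (out : String) : Prop := out = remove_punctuation_alt s
instance (s : String) (out : String) : Decidable (Spec_remove_punctuation s out) := by unfold Spec_remove_punctuation; infer_instance

-- ===== CLAIM (what is proved, stated in full; the proofs are below) =====
def Claim_equal_remove_punctuation : Prop := ∀ (s : String), Dom_remove_punctuation s → Spec_remove_punctuation s (remove_punctuation s)

-- ===== LEMMAS AND PROOFS =====

lemma mem_punctB_iff (c : Char) : c ∈ pvPunctB ↔ c ∈ pvPunct := by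
  unfold pvPunctB pvPunct
  rw [PySem.Set.mem_ofList]

lemma pvGoA_eq (cs : List Char) : ∀ out : List Char,
    pvGoA cs out =
      if cs.all (fun c => PySem.Chars.isalpha c || decide (c ∈ pvPunctB)) then
        String.mk (out ++ (cs.filter (fun c => PySem.Chars.isalpha c)).map PySem.Chars.upperChar)
      else "Invalid input" := by
  induction cs with
  | nil => intro out; simp [pvGoA]
  | cons c rest ih =>
    intro out
    by_cases ha : PySem.Chars.isalpha c = true
    · simp [pvGoA, ha, ih, List.all_cons]
    · by_cases hp : c ∈ pvPunct
      · simp [pvGoA, ha, hp, ih, List.all_cons, mem_punctB_iff]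
      · simp [pvGoA, ha, hp, List.all_cons, mem_punctB_iff]

-- ===== VERDICT (by name: the statement is the Claim_ definition above) =====
theorem remove_punctuation_spec : Claim_equal_remove_punctuation := by
  intro s _
  unfold Spec_remove_punctuation remove_punctuation remove_punctuation_alt
  rw [pvGoA_eq]
  simp
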